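-- pv_equiv track=rewrite | github.com/Seunghyun0606/algorithm | 과거풀이/프로그래머스/lv1 수포자.py | solution
-- ===== SOURCE A (Python) =====
-- def solution(answers):
--     answer = [0]*3
--
--     person1 = [1, 2, 3, 4, 5, 1, 2, 3, 4, 5]
--     person2 = [2, 1, 2, 3, 2, 4, 2, 5]  # 2
--     person3 = [3, 3, 1, 1, 2, 2, 4, 4, 5, 5]  # 2개 반복
--
--     n = 0
--     k = 0
--     for i in range(len(answers)):
--         ans = answers[i]
--         if i // 10:
--             n = i // 10
--         if i // 8:
--             k = i // 8
--         if ans == person1[i-10*n]: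
--             answer[0] += 1
--         if ans == person2[i-8*k]:
--             answer[1] += 1
--         if ans == person3[i-10*n]:
--             answer[2] += 1
--
--     ans_max = max(answer)
--     result = []
--     for j in range(3):
--         if answer[j] == ans_max:
--             result.append(j+1)
--     return result
-- ===== SOURCE B (Python) =====
-- def solution(answers):
--     # One pass builds a frequency table keyed by (position mod 40, answer); 40 = lcm of the
--     # three pattern periods.  Each score is then a fixed 40-term table lookup, never touching
--     # the answers again.
--     cnt = {}
--     for i, a in enumerate(answers):
--         key = (i % 40, a)
--         cnt[key] = cnt.get(key, 0) + 1
--     bases = [[1, 2, 3, 4, 5], [2, 1, 2, 3, 2, 4, 2, 5], [3, 3, 1, 1, 2, 2, 4, 4, 5, 5]]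
--     scores = [sum(cnt.get((j, b[j % len(b)]), 0) for j in range(40)) for b in bases]
--     m = max(scores)
--     return [k + 1 for k, s in enumerate(scores) if s == m]
-- ===== Notes on version B (the rewrite author's own statement) =====
-- stated objective: alternative
-- what changed: Replaces A's fused comparison loop (with n/k floor-division index bookkeeping against three cyclic patterns) by a one-pass frequency table keyed by (position mod 40, answer) — 40 = lcm of the pattern periods — after which each score is a fixed 40-term table lookup that never touches the answers again, followed by a plain max/collect.
import Mathlib
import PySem

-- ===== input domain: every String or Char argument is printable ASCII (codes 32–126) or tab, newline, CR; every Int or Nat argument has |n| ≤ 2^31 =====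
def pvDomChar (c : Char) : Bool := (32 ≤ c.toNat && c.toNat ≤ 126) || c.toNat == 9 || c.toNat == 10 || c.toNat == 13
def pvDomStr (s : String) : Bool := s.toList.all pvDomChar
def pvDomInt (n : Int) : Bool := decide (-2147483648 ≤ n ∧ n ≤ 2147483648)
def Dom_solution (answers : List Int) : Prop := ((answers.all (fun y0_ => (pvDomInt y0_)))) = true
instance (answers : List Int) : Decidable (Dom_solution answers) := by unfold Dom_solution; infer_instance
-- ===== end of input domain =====

-- B replaces A's fused comparison loop (with its n/k floor-division index bookkeeping) by a
-- one-pass frequency table keyed by (position mod 40, answer); each score is then a fixed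
-- 40-term table lookup, followed by a plain max/collect; objective: alternative.

-- ===== PORT A =====
def person1A : List Int := [1, 2, 3, 4, 5, 1, 2, 3, 4, 5]
def person2A : List Int := [2, 1, 2, 3, 2, 4, 2, 5]
def person3A : List Int := [3, 3, 1, 1, 2, 2, 4, 4, 5, 5]

-- one iteration of A's for-loop; the pattern lookups use pyGetD 0 (in A's reachable
-- states the effective index is always in range, so the default is never consulted)
def solStep (answers : List Int) (st : Int × Int × Int × Int × Int) (i : Int) :
    Int × Int × Int × Int × Int :=
  match st with
  | (a0, a1, a2, n, k) =>
    let ans := PySem.List.pyGetD answers i 0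
    let n := if PySem.Int.floordiv i 10 != 0 then PySem.Int.floordiv i 10 else n
    let k := if PySem.Int.floordiv i 8 != 0 then PySem.Int.floordiv i 8 else k
    let a0 := if ans == PySem.List.pyGetD person1A (i - 10 * n) 0 then a0 + 1 else a0
    let a1 := if ans == PySem.List.pyGetD person2A (i - 8 * k) 0 then a1 + 1 else a1
    let a2 := if ans == PySem.List.pyGetD person3A (i - 10 * n) 0 then a2 + 1 else a2
    (a0, a1, a2, n, k)

def solution (answers : List Int) : List Int :=
  let st := (PySem.List.pyRange 0 (answers.length : Int) 1).foldl (solStep answers) (0, 0, 0, 0, 0)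
  let answer : List Int := [st.1, st.2.1, st.2.2.1]
  let ansMax := (PySem.List.max? answer (fun x => x)).getD 0
  (PySem.List.pyRange 0 3 1).foldl
    (fun result j => if PySem.List.pyGetD answer j 0 == ansMax then result ++ [j + 1] else result) []

-- ===== PORT B =====
-- the frequency-table pass: cnt[(i % 40, a)] = cnt.get((i % 40, a), 0) + 1
def tallyB (answers : List Int) : PySem.Dict (Int × Int) Int :=
  (PySem.List.enumerate answers 0).foldl
    (fun cnt p => cnt.modify (PySem.Int.mod p.1 40, p.2) 0 (· + 1)) PySem.Dict.empty

-- sum(cnt.get((j, b[j % len(b)]), 0) for j in range(40))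
def scoreB (cnt : PySem.Dict (Int × Int) Int) (b : List Int) : Int :=
  ((PySem.List.pyRange 0 40 1).map
    (fun j => cnt.getD (j, PySem.List.pyGetD b (PySem.Int.mod j (b.length : Int)) 0) 0)).sum

def solution_alt (answers : List Int) : List Int :=
  let cnt := tallyB answers
  let bases : List (List Int) :=
    [[1, 2, 3, 4, 5], [2, 1, 2, 3, 2, 4, 2, 5], [3, 3, 1, 1, 2, 2, 4, 4, 5, 5]]
  let scores := bases.map (scoreB cnt)
  let m := (PySem.List.max? scores (fun x => x)).getD 0
  (PySem.List.enumerate scores 0).filterMap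
    (fun p => if p.2 == m then some (p.1 + 1) else none)

-- ===== PRECONDITION & SPEC =====
def Spec_solution (answers : List Int) (out : List Int) : Prop := out = solution_alt answers
instance (answers : List Int) (out : List Int) : Decidable (Spec_solution answers out) := by unfold Spec_solution; infer_instance

-- ===== CLAIM (what is proved, stated in full; the proofs are below) =====
def Claim_equal_solution : Prop := ∀ (answers : List Int), Dom_solution answers → Spec_solution answers (solution answers)

-- ===== LEMMAS AND PROOFS =====

-- per-index indicators, written with A's pattern lists and A's effective indices i % 10 / i % 8
def indA1 (answers : List Int) (i : Int) : Int :=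
  if PySem.List.pyGetD answers i 0 == PySem.List.pyGetD person1A (PySem.Int.mod i 10) 0 then 1 else 0
def indA2 (answers : List Int) (i : Int) : Int :=
  if PySem.List.pyGetD answers i 0 == PySem.List.pyGetD person2A (PySem.Int.mod i 8) 0 then 1 else 0
def indA3 (answers : List Int) (i : Int) : Int :=
  if PySem.List.pyGetD answers i 0 == PySem.List.pyGetD person3A (PySem.Int.mod i 10) 0 then 1 else 0

-- one step of A's loop: given the loop invariant on n and k, A's 'i - 10*n' / 'i - 8*k'
-- are exactly 'i % 10' / 'i % 8', and n, k leave the step as i // 10, i // 8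
theorem step_eq (answers : List Int) (j : ℕ) (a0 a1 a2 n k : Int)
    (hn : (j : Int) < 10 → n = 0) (hk : (j : Int) < 8 → k = 0) :
    solStep answers (a0, a1, a2, n, k) (j : Int) =
      (a0 + indA1 answers (j : Int), a1 + indA2 answers (j : Int), a2 + indA3 answers (j : Int),
       ((j / 10 : ℕ) : Int), ((j / 8 : ℕ) : Int)) := by
  have hf10 : PySem.Int.floordiv (j:Int) 10 = ((j / 10 : ℕ) : Int) := by
    exact_mod_cast PySem.Int.floordiv_natCast j 10
  have hf8 : PySem.Int.floordiv (j:Int) 8 = ((j / 8 : ℕ) : Int) := by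
    exact_mod_cast PySem.Int.floordiv_natCast j 8
  have hm10 : PySem.Int.mod (j:Int) 10 = ((j % 10 : ℕ) : Int) := by
    exact_mod_cast PySem.Int.mod_natCast j 10
  have hm8 : PySem.Int.mod (j:Int) 8 = ((j % 8 : ℕ) : Int) := by
    exact_mod_cast PySem.Int.mod_natCast j 8
  have hn' : (if PySem.Int.floordiv (j:Int) 10 != 0 then PySem.Int.floordiv (j:Int) 10 else n)
      = ((j / 10 : ℕ) : Int) := by
    rw [hf10]
    by_cases h : j < 10
    · have : j / 10 = 0 := Nat.div_eq_of_lt h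
      simp [this, hn (by exact_mod_cast h)]
    · have h2 : ((j / 10 : ℕ) : Int) ≠ 0 := by
        have : j / 10 ≠ 0 := by omega
        exact_mod_cast this
      have h3 : (((j / 10 : ℕ) : Int) != 0) = true := by simpa [bne_iff_ne] using h2
      rw [h3, if_pos rfl]
  have hk' : (if PySem.Int.floordiv (j:Int) 8 != 0 then PySem.Int.floordiv (j:Int) 8 else k)
      = ((j / 8 : ℕ) : Int) := by
    rw [hf8]
    by_cases h : j < 8
    · have : j / 8 = 0 := Nat.div_eq_of_lt h
      simp [this, hk (by exact_mod_cast h)]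
    · have h2 : ((j / 8 : ℕ) : Int) ≠ 0 := by
        have : j / 8 ≠ 0 := by omega
        exact_mod_cast this
      have h3 : (((j / 8 : ℕ) : Int) != 0) = true := by simpa [bne_iff_ne] using h2
      rw [h3, if_pos rfl]
  have hidx10 : (j : Int) - 10 * ((j / 10 : ℕ) : Int) = ((j % 10 : ℕ) : Int) := by
    push_cast
    omega
  have hidx8 : (j : Int) - 8 * ((j / 8 : ℕ) : Int) = ((j % 8 : ℕ) : Int) := by
    push_cast
    omega
  simp only [solStep, hn', hk', hidx10, hidx8, indA1, indA2, indA3, hm10, hm8]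
  simp only [Prod.mk.injEq]
  and_intros <;> first | (split <;> ring) | rfl | trivial

-- A's loop, run from index j over m further indices, adds the three indicator sums
theorem loopA (answers : List Int) :
    ∀ (m j : ℕ) (a0 a1 a2 n k : Int),
      ((j : Int) < 10 → n = 0) → ((j : Int) < 8 → k = 0) →
      ∃ n' k',
        (PySem.List.pyRange (j : Int) ((j + m : ℕ) : Int) 1).foldl (solStep answers) (a0, a1, a2, n, k) =
          (a0 + ((PySem.List.pyRange (j : Int) ((j + m : ℕ) : Int) 1).map (indA1 answers)).sum,
           a1 + ((PySem.List.pyRange (j : Int) ((j + m : ℕ) : Int) 1).map (indA2 answers)).sum,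
           a2 + ((PySem.List.pyRange (j : Int) ((j + m : ℕ) : Int) 1).map (indA3 answers)).sum,
           n', k') := by
  intro m
  induction m with
  | zero =>
    intro j a0 a1 a2 n k hn hk
    refine ⟨n, k, ?_⟩
    rw [PySem.List.pyRange_one_eq_nil (by push_cast; omega)]
    simp
  | succ m ih =>
    intro j a0 a1 a2 n k hn hk
    have hcons : PySem.List.pyRange (j:Int) ((j + (m+1) : ℕ):Int) 1
        = (j:Int) :: PySem.List.pyRange ((j:Int)+1) ((j + (m+1):ℕ):Int) 1 :=
      PySem.List.pyRange_one_cons (by push_cast; omega)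
    have hb : ((j + (m+1) : ℕ) : Int) = (((j+1) + m : ℕ) : Int) := by push_cast; ring
    have htail : PySem.List.pyRange ((j:Int)+1) ((j + (m+1):ℕ):Int) 1
        = PySem.List.pyRange (((j+1:ℕ)):Int) (((j+1) + m : ℕ):Int) 1 := by
      rw [hb]; push_cast; ring_nf
    obtain ⟨n2, k2, hIH⟩ := ih (j+1) (a0 + indA1 answers (j:Int)) (a1 + indA2 answers (j:Int))
      (a2 + indA3 answers (j:Int)) ((j / 10 : ℕ) : Int) ((j / 8 : ℕ) : Int)
      (by intro h
          have h1 : j + 1 < 10 := by exact_mod_cast h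
          have : j / 10 = 0 := Nat.div_eq_of_lt (by omega)
          simp [this])
      (by intro h
          have h1 : j + 1 < 8 := by exact_mod_cast h
          have : j / 8 = 0 := Nat.div_eq_of_lt (by omega)
          simp [this])
    refine ⟨n2, k2, ?_⟩
    rw [hcons, List.foldl_cons, step_eq answers j a0 a1 a2 n k hn hk, htail, hIH]
    simp only [List.map_cons, List.sum_cons, Prod.mk.injEq]
    and_intros <;> first | ring | rfl | trivial

-- B side: the 40-term lookup sum over the counter is the per-element indicator sum.
-- Step 1: the tally fold is PySem.Dict.counter of the key list.
theorem tallyB_eq_counter (answers : List Int) :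
    tallyB answers =
      PySem.Dict.counter ((PySem.List.enumerate answers 0).map
        (fun p => (PySem.Int.mod p.1 40, p.2))) := by
  rw [PySem.Dict.counter_eq_foldl, List.foldl_map]
  rfl

-- a 0/1 indicator sum over a list of Ints is the count of the matched value
theorem sum_ite_eq_count (xs : List Int) (a : Int) :
    (xs.map (fun j => if j = a then (1 : Int) else 0)).sum = (xs.count a : Int) := by
  induction xs with
  | nil => simp
  | cons x xs ih =>
    rw [List.map_cons, List.sum_cons, ih, List.count_cons]
    by_cases h : x = a <;> simp [h, add_comm]

-- Step 2: summing counts of the 40 distinct keys (j, g j) over any pair list L counts,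
-- for each element of L, whether its second component is g of its first (first in range)
theorem sum_count_keys (g : Int → Int) (L : List (Int × Int)) :
    ((PySem.List.pyRange 0 40 1).map (fun j => (L.count (j, g j) : Int))).sum =
      (L.map (fun p => if 0 ≤ p.1 ∧ p.1 < 40 ∧ p.2 = g p.1 then (1 : Int) else 0)).sum := by
  induction L with
  | nil => simp
  | cons p L ih =>
    have hsplit : ∀ j : Int, ((p :: L).count (j, g j) : Int)
        = (L.count (j, g j) : Int) + (if p = (j, g j) then (1 : Int) else 0) := by
      intro j
      rw [List.count_cons]
      by_cases h : p = (j, g j) <;> simp [h]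
    simp only [hsplit]
    rw [PySem.List.sum_map_add_int]
    rw [ih]
    simp only [List.map_cons, List.sum_cons]
    have hone : ((PySem.List.pyRange 0 40 1).map (fun j => if p = (j, g j) then (1 : Int) else 0)).sum
        = (if 0 ≤ p.1 ∧ p.1 < 40 ∧ p.2 = g p.1 then (1 : Int) else 0) := by
      by_cases hp : p.2 = g p.1
      · have hkey : ∀ j : Int, (p = (j, g j)) ↔ (j = p.1) := by
          intro j
          constructor
          · rintro rfl; rfl
          · rintro rfl; exact (Prod.ext_iff.mpr ⟨rfl, hp⟩)
        simp only [hkey]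
        rw [sum_ite_eq_count]
        by_cases hin : 0 ≤ p.1 ∧ p.1 < 40
        · have hmem : p.1 ∈ PySem.List.pyRange 0 40 1 := PySem.List.mem_pyRange_one.mpr hin
          have hcount : (PySem.List.pyRange 0 40 1).count p.1 = 1 :=
            List.count_eq_one_of_mem (PySem.List.nodup_pyRange_one 0 40) hmem
          rw [hcount]
          simp [hin.1, hin.2, hp]
        · have hnm : p.1 ∉ PySem.List.pyRange 0 40 1 := by
            intro hmem
            exact hin (PySem.List.mem_pyRange_one.mp hmem)
          have hcount : (PySem.List.pyRange 0 40 1).count p.1 = 0 :=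
            List.count_eq_zero_of_not_mem hnm
          rw [hcount]
          have hc : ¬(0 ≤ p.1 ∧ p.1 < 40 ∧ p.2 = g p.1) := fun h => hin ⟨h.1, h.2.1⟩
          simp [hc]
      · have hz : ∀ j ∈ PySem.List.pyRange 0 40 1, (if p = (j, g j) then (1 : Int) else 0) = 0 := by
          intro j hj
          have : p ≠ (j, g j) := by
            intro h
            exact hp (by rw [h])
          simp [this]
        rw [List.map_congr_left hz]
        have hc : ¬(0 ≤ p.1 ∧ p.1 < 40 ∧ p.2 = g p.1) := fun h => hp h.2.2
        simp [hc]
    rw [hone]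
    ring

-- Step 3: B's score of a base pattern is the indicator sum over enumerate
theorem scoreB_eq (answers : List Int) (b : List Int) (hb : 0 < b.length)
    (hdvd : (b.length : Int) ∣ 40) :
    scoreB (tallyB answers) b =
      ((PySem.List.enumerate answers 0).map
        (fun q => if q.2 = PySem.List.pyGetD b (PySem.Int.mod q.1 (b.length : Int)) 0
                  then (1 : Int) else 0)).sum := by
  unfold scoreB
  rw [tallyB_eq_counter]
  have hget : ∀ j : Int,
      (PySem.Dict.counter ((PySem.List.enumerate answers 0).map
         (fun p => (PySem.Int.mod p.1 40, p.2)))).getD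
        (j, PySem.List.pyGetD b (PySem.Int.mod j (b.length : Int)) 0) 0
      = (((PySem.List.enumerate answers 0).map (fun p => (PySem.Int.mod p.1 40, p.2))).count
          (j, PySem.List.pyGetD b (PySem.Int.mod j (b.length : Int)) 0) : Int) := by
    intro j
    exact PySem.Dict.getD_counter _ _
  rw [List.map_congr_left (fun j _ => hget j)]
  rw [sum_count_keys (fun j => PySem.List.pyGetD b (PySem.Int.mod j (b.length : Int)) 0)]
  rw [List.map_map]
  refine congrArg List.sum (List.map_congr_left ?_)
  intro q _
  simp only [Function.comp]
  norm_num
  have h0 : 0 ≤ q.1 % 40 := Int.emod_nonneg _ (by norm_num)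
  have h40 : q.1 % 40 < 40 := Int.emod_lt_of_pos _ (by norm_num)
  have hbl : (0 : Int) < (b.length : Int) := by exact_mod_cast hb
  rw [PySem.Int.mod_eq_emod_of_pos hbl, PySem.Int.mod_eq_emod_of_pos hbl,
      Int.emod_emod_of_dvd q.1 hdvd]
  simp [h0, h40]

-- the doubled pattern-1 list read at i % 10 is the 5-element base read at i % 5
theorem period1 (j : Int) (hj : 0 ≤ j) :
    PySem.List.pyGetD ([1,2,3,4,5] : List Int) (j % 5) 0 =
    PySem.List.pyGetD person1A (j % 10) 0 := by
  lift j to ℕ using hj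
  have h5 : (j : Int) % 5 = ((j % 5 : ℕ) : Int) := by omega
  have h10 : (j : Int) % 10 = ((j % 10 : ℕ) : Int) := by omega
  rw [h5, h10]
  have hd : j % 5 = (j % 10) % 5 := (Nat.mod_mod_of_dvd j (by norm_num)).symm
  rw [hd]
  have hr : j % 10 < 10 := Nat.mod_lt _ (by norm_num)
  set r := j % 10 with hrdef
  clear_value r
  interval_cases r <;> decide

-- each of B's three scores equals the matching indicator sum of A's loop
theorem score1_eq (answers : List Int) :
    scoreB (tallyB answers) [1,2,3,4,5]
      = ((PySem.List.pyRange 0 (answers.length : Int) 1).map (indA1 answers)).sum := by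
  rw [scoreB_eq answers [1,2,3,4,5] (by norm_num) (by norm_num),
      PySem.List.enumerate_eq_map_pyRange (d := 0), List.map_map]
  refine congrArg List.sum (List.map_congr_left ?_)
  intro j hj
  have hj0 : 0 ≤ j := (PySem.List.mem_pyRange_one.mp hj).1
  simp only [Function.comp, indA1]
  norm_num
  rw [period1 j hj0]

theorem score2_eq (answers : List Int) :
    scoreB (tallyB answers) [2,1,2,3,2,4,2,5]
      = ((PySem.List.pyRange 0 (answers.length : Int) 1).map (indA2 answers)).sum := by
  rw [scoreB_eq answers [2,1,2,3,2,4,2,5] (by norm_num) (by norm_num),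
      PySem.List.enumerate_eq_map_pyRange (d := 0), List.map_map]
  refine congrArg List.sum (List.map_congr_left ?_)
  intro j hj
  simp only [Function.comp, indA2, person2A]
  norm_num

theorem score3_eq (answers : List Int) :
    scoreB (tallyB answers) [3,3,1,1,2,2,4,4,5,5]
      = ((PySem.List.pyRange 0 (answers.length : Int) 1).map (indA3 answers)).sum := by
  rw [scoreB_eq answers [3,3,1,1,2,2,4,4,5,5] (by norm_num) (by norm_num),
      PySem.List.enumerate_eq_map_pyRange (d := 0), List.map_map]
  refine congrArg List.sum (List.map_congr_left ?_)
  intro j hj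
  simp only [Function.comp, indA3, person3A]
  norm_num

-- with both score triples rewritten to the same three sums, the max/collect endings agree
theorem final_stage (s1 s2 s3 : Int) :
    (let answer : List Int := [s1, s2, s3]
     let ansMax := (PySem.List.max? answer (fun x => x)).getD 0
     (PySem.List.pyRange 0 3 1).foldl
       (fun result j => if PySem.List.pyGetD answer j 0 == ansMax then result ++ [j + 1] else result) [])
    = (let m := (PySem.List.max? ([s1, s2, s3] : List Int) (fun x => x)).getD 0
       (PySem.List.enumerate ([s1, s2, s3] : List Int) 0).filterMap
         (fun p => if p.2 == m then some (p.1 + 1) else none)) := by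
  have hr : PySem.List.pyRange 0 3 1 = [0, 1, 2] := by decide
  simp only [hr, PySem.List.enumerate_cons, PySem.List.enumerate_nil, List.foldl, List.filterMap]
  have e0 : PySem.List.pyGetD ([s1, s2, s3] : List Int) 0 0 = s1 := rfl
  have e1 : PySem.List.pyGetD ([s1, s2, s3] : List Int) 1 0 = s2 := rfl
  have e2 : PySem.List.pyGetD ([s1, s2, s3] : List Int) 2 0 = s3 := rfl
  rw [e0, e1, e2]
  norm_num
  split_ifs <;> simp

theorem main_eq (answers : List Int) : solution answers = solution_alt answers := by
  unfold solution solution_alt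
  obtain ⟨n', k', h⟩ := loopA answers answers.length 0 0 0 0 0 0 (fun _ => rfl) (fun _ => rfl)
  simp only [Nat.cast_zero, zero_add] at h
  rw [h]
  simp only [List.map_cons, List.map_nil, score1_eq, score2_eq, score3_eq]
  exact final_stage _ _ _

-- ===== VERDICT (by name: the statement is the Claim_ definition above) =====
theorem solution_spec : Claim_equal_solution := by
  intro answers _
  exact main_eq answers
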